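-- pv_equiv track=rewrite | github.com/jinhuang-de/BA-Resolving-comparative-anaphora-with-and-without-lexical-heads | src/util.py | get_semantic_feature_definiteness
-- ===== SOURCE A (Python) =====
-- def get_semantic_feature_definiteness(children_of_head):
--     definite = ["the", "all", "both", "either", "neither", "no", "none"]
--     indefinite = ["a", "an", "each", "every", "some", "any," "few", "several", "many", "much", "little", "most", "more",
--                   "fewer", "less"]
--     demonstrative = ['this', 'these', 'that', 'those']
--
--     if any(x in definite for x in children_of_head):
--         return 'definite'
--     elif any(x in indefinite for x in children_of_head):
--         return 'indefinite'
--     elif any(x in demonstrative for x in children_of_head):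
--         return 'demonstrative'
-- ===== SOURCE B (Python) =====
-- def get_semantic_feature_definiteness(children_of_head):
--     definite = ["the", "all", "both", "either", "neither", "no", "none"]
--     indefinite = ["a", "an", "each", "every", "some", "any," "few", "several", "many", "much", "little", "most", "more",
--                   "fewer", "less"]
--     demonstrative = ['this', 'these', 'that', 'those']
--
--     def rank(w):
--         if w in definite:
--             return 0
--         if w in indefinite:
--             return 1
--         if w in demonstrative:
--             return 2
--         return None
--
--     best = None
--     for w in children_of_head:
--         r = rank(w)
--         if r is not None and (best is None or r < best):
--             best = r
--     if best is None:
--         return None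
--     return ['definite', 'indefinite', 'demonstrative'][best]
-- ===== Notes on version B (the rewrite author's own statement) =====
-- stated objective: alternative
-- what changed: Replaces A's three category-major any(...) scans over the whole input with a single word-major pass that ranks each word (0=definite,1=indefinite,2=demonstrative, keeping the 'any,few' concatenation quirk verbatim) and keeps the minimum rank seen, mapping it to the label at the end.
import Mathlib
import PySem

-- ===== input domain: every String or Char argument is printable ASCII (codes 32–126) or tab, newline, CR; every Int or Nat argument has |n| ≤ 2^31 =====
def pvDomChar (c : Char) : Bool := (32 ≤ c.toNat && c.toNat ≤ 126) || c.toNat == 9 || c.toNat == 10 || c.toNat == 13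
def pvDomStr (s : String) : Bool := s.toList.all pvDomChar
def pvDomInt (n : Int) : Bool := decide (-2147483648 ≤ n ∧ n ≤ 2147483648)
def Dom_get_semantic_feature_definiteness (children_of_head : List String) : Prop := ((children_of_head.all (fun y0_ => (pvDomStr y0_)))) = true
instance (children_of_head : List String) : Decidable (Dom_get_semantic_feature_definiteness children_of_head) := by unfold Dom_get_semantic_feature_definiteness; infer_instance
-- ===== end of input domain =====

-- B replaces A's three category-major any(...) scans by one word-major pass keeping the
-- minimum category rank (alternative decomposition; the 'any,few' concatenation quirk is kept verbatim).

-- The three word lists, shared by both ports (both Pythons define the identical literals;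
-- note "any," "few" concatenates to "any,few" in Python, kept as such).
def pvDefinite : List String := ["the", "all", "both", "either", "neither", "no", "none"]
def pvIndefinite : List String := ["a", "an", "each", "every", "some", "any,few", "several", "many", "much", "little", "most", "more", "fewer", "less"]
def pvDemonstrative : List String := ["this", "these", "that", "those"]

-- ===== PORT A =====
def get_semantic_feature_definiteness (children_of_head : List String) : Option String :=
  if children_of_head.any (fun x => pvDefinite.contains x) then some "definite"
  else if children_of_head.any (fun x => pvIndefinite.contains x) then some "indefinite"
  else if children_of_head.any (fun x => pvDemonstrative.contains x) then some "demonstrative"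
  else none

-- ===== PORT B =====
-- rank(w) of Source B
def pvRank (w : String) : Option Nat :=
  if pvDefinite.contains w then some 0
  else if pvIndefinite.contains w then some 1
  else if pvDemonstrative.contains w then some 2
  else none

-- the body of Source B's loop: keep the smaller rank
def pvStep (best : Option Nat) (w : String) : Option Nat :=
  match pvRank w with
  | some r =>
    match best with
    | none => some r
    | some b => if r < b then some r else some b
  | none => best

def get_semantic_feature_definiteness_alt (children_of_head : List String) : Option String :=
  match children_of_head.foldl pvStep none with
  | none => none
  -- Source B indexes the literal 3-list ['definite','indefinite','demonstrative'][best];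
  -- best is always 0, 1 or 2 here, written as a match on the index.
  | some 0 => some "definite"
  | some 1 => some "indefinite"
  | some _ => some "demonstrative"

-- ===== PRECONDITION & SPEC =====
def Spec_get_semantic_feature_definiteness (children_of_head : List String) (out : Option String) : Prop := out = get_semantic_feature_definiteness_alt children_of_head
instance (children_of_head : List String) (out : Option String) : Decidable (Spec_get_semantic_feature_definiteness children_of_head out) := by unfold Spec_get_semantic_feature_definiteness; infer_instance

-- ===== CLAIM (what is proved, stated in full; the proofs are below) =====
def Claim_equal_get_semantic_feature_definiteness : Prop := ∀ (children_of_head : List String), Dom_get_semantic_feature_definiteness children_of_head → Spec_get_semantic_feature_definiteness children_of_head (get_semantic_feature_definiteness children_of_head)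

-- ===== LEMMAS AND PROOFS =====

-- min on Option Nat, the combining operation realized by pvStep
def pvOmin : Option Nat → Option Nat → Option Nat
  | none, y => y
  | some b, none => some b
  | some b, some r => if r < b then some r else some b

theorem pvStep_eq_omin (best : Option Nat) (w : String) : pvStep best w = pvOmin best (pvRank w) := by
  cases best <;> cases h : pvRank w <;> simp [pvStep, pvOmin, h]

theorem pvOmin_assoc (a b c : Option Nat) : pvOmin (pvOmin a b) c = pvOmin a (pvOmin b c) := by
  cases a <;> cases b <;> cases c <;>
    simp only [pvOmin] <;> (try split_ifs) <;>
    (try simp only [pvOmin, Option.some.injEq]) <;> (try split_ifs) <;>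
    first | rfl | omega

theorem foldl_step_acc (l : List String) (b : Option Nat) :
    l.foldl pvStep b = pvOmin b (l.foldl pvStep none) := by
  induction l generalizing b with
  | nil => cases b <;> simp [pvOmin]
  | cons w l ih =>
    simp only [List.foldl_cons]
    rw [ih (pvStep b w), ih (pvStep none w), pvStep_eq_omin, pvStep_eq_omin]
    have : pvOmin none (pvRank w) = pvRank w := by cases h : pvRank w <;> simp [pvOmin]
    rw [this, pvOmin_assoc]

-- characterization of the single pass in terms of the three membership scans
theorem fold_char (l : List String) :
    l.foldl pvStep none =
      if l.any (fun x => pvDefinite.contains x) then some 0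
      else if l.any (fun x => pvIndefinite.contains x) then some 1
      else if l.any (fun x => pvDemonstrative.contains x) then some 2
      else none := by
  induction l with
  | nil => simp
  | cons w l ih =>
    simp only [List.foldl_cons]
    rw [foldl_step_acc, ih, pvStep_eq_omin]
    have h0 : pvOmin none (pvRank w) = pvRank w := by cases h : pvRank w <;> simp [pvOmin]
    rw [h0]
    simp only [List.any_cons]
    rcases Bool.eq_false_or_eq_true (pvDefinite.contains w) with h1 | h1 <;>
    rcases Bool.eq_false_or_eq_true (pvIndefinite.contains w) with h2 | h2 <;>
    rcases Bool.eq_false_or_eq_true (pvDemonstrative.contains w) with h3 | h3 <;>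
    rcases Bool.eq_false_or_eq_true (l.any fun x => pvDefinite.contains x) with hA | hA <;>
    rcases Bool.eq_false_or_eq_true (l.any fun x => pvIndefinite.contains x) with hB | hB <;>
    rcases Bool.eq_false_or_eq_true (l.any fun x => pvDemonstrative.contains x) with hC | hC <;>
      simp only [pvRank, h1, h2, h3, hA, hB, hC] <;> rfl

-- ===== VERDICT (by name: the statement is the Claim_ definition above) =====
theorem get_semantic_feature_definiteness_spec : Claim_equal_get_semantic_feature_definiteness := by
  intro c _
  unfold Spec_get_semantic_feature_definiteness
  unfold get_semantic_feature_definiteness get_semantic_feature_definiteness_alt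
  rw [fold_char]
  split_ifs <;> rfl
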